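-- pv_equiv track=rewrite | github.com/ra9obw/llmtest | finetune/llm_promt_driver.py | find_last_tag
-- ===== SOURCE A (Python) =====
-- def find_last_tag(text):
--     tags = ['@brief', '@param', '@return', '@throws', '@note', '@details']
--     last_pos = -1
--     result = None
--     for tag in tags:
--         pos = text.rfind(tag)
--         if pos > last_pos:
--             last_pos = pos
--             result = tag
--     return result
-- ===== SOURCE B (Python) =====
-- def find_last_tag(text):
--     tags = ('@brief', '@param', '@return', '@throws', '@note', '@details')
--     result = None
--     for i in range(len(text)):
--         for tag in tags:
--             if text.startswith(tag, i):
--                 result = tag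
--                 break
--     return result
-- ===== Notes on version B (the rewrite author's own statement) =====
-- stated objective: alternative
-- what changed: Replaces six independent backward rfind scans plus an argmax over their positions with a single left-to-right pass over the text that records the tag matched at the latest position.
import Mathlib
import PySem

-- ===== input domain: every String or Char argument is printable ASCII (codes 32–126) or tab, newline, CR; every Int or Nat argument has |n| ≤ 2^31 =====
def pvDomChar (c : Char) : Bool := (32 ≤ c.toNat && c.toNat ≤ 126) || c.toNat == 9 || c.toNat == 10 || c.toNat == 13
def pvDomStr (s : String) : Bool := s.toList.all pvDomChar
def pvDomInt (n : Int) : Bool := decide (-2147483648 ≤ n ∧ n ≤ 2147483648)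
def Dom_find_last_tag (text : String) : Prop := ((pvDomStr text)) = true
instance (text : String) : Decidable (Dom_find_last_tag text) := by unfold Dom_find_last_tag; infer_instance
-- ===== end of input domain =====

-- B replaces A's six per-tag backward rfind scans (plus argmax over their positions) by a
-- single left-to-right pass that records the tag matched at the latest position (alternative, same cost).


-- ===== PORT A =====
-- literal port of A: per-tag text.rfind(tag) (PySem.Str.rfind), keeping (last_pos, result)
def find_last_tag (text : String) : Option String :=
  let tags : List String := ["@brief", "@param", "@return", "@throws", "@note", "@details"]
  (tags.foldl
    (fun (st : Int × Option String) tag =>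
      let pos := PySem.Str.rfind text tag
      if pos > st.1 then (pos, some tag) else st)
    (-1, none)).2

-- ===== PORT B =====
-- literal port of B: one forward pass over i in range(len(text)); text.startswith(tag, i) with
-- 0 ≤ i is exactly tag.toList.isPrefixOf (text.toList.drop i); the inner for/break is find?.
def find_last_tag_alt (text : String) : Option String :=
  let tags : List String := ["@brief", "@param", "@return", "@throws", "@note", "@details"]
  let l := text.toList
  (List.range l.length).foldl
    (fun (result : Option String) i =>
      match tags.find? (fun tag => tag.toList.isPrefixOf (l.drop i)) with
      | some tag => some tag
      | none => result)
    none

-- ===== PRECONDITION & SPEC =====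
def Spec_find_last_tag (text : String) (out : Option String) : Prop := out = find_last_tag_alt text
instance (text : String) (out : Option String) : Decidable (Spec_find_last_tag text out) := by unfold Spec_find_last_tag; infer_instance

-- ===== CLAIM (what is proved, stated in full; the proofs are below) =====
def Claim_equal_find_last_tag : Prop := ∀ (text : String), Dom_find_last_tag text → Spec_find_last_tag text (find_last_tag text)

-- ===== LEMMAS AND PROOFS =====

def pvTags : List String := ["@brief", "@param", "@return", "@throws", "@note", "@details"]

-- A-side abstraction: the argmax fold over the tags for an arbitrary position function f
def pvAfold (f : String → Int) : Int × Option String :=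
  pvTags.foldl (fun st tag => if f tag > st.1 then (f tag, some tag) else st) (-1, none)

-- downward characterisation of "last position < k where tag matches, else -1"
def pvGD (l tag : List Char) : Nat → Int
  | 0 => -1
  | k + 1 => if tag.isPrefixOf (l.drop k) then (k : Int) else pvGD l tag k

-- B-side downward scan: last i < k with some tag matching at i, together with that tag
def pvLastHit (l : List Char) : Nat → Option (Nat × String)
  | 0 => none
  | k + 1 =>
    match pvTags.find? (fun tag => tag.toList.isPrefixOf (l.drop k)) with
    | some t => some (k, t)
    | none => pvLastHit l k

lemma pvNoPrefix : ∀ t1 ∈ pvTags, ∀ t2 ∈ pvTags, t1.toList <+: t2.toList → t1 = t2 := by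
  decide

lemma pvTags_ne_nil : ∀ t ∈ pvTags, t.toList ≠ [] := by decide

lemma pvUniq (l : List Char) (k : Nat) {t1 t2 : String}
    (h1 : t1 ∈ pvTags) (h2 : t2 ∈ pvTags)
    (p1 : t1.toList.isPrefixOf (l.drop k) = true) (p2 : t2.toList.isPrefixOf (l.drop k) = true) :
    t1 = t2 := by
  rw [List.isPrefixOf_iff_prefix] at p1 p2
  rcases List.prefix_or_prefix_of_prefix p1 p2 with h | h
  · exact pvNoPrefix t1 h1 t2 h2 h
  · exact (pvNoPrefix t2 h2 t1 h1 h).symm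

lemma pvGD_le (l tag : List Char) : ∀ k, pvGD l tag k ≤ (k : Int) - 1 := by
  intro k
  induction k with
  | zero => simp [pvGD]
  | succ k ih =>
    simp only [pvGD]
    split
    · push_cast; omega
    · push_cast at ih ⊢; omega

lemma pvGo_eq_GD (l tag : List Char) : ∀ j, PySem.Chars.rfind.go l tag j = pvGD l tag (j + 1) := by
  intro j
  induction j with
  | zero => simp [PySem.Chars.rfind.go, pvGD]
  | succ j ih => simp [PySem.Chars.rfind.go, pvGD, ih]

-- the argmax fold returns the unique maximiser
lemma pvStay (f : String → Int) : ∀ (ts : List String) (st : Int × Option String),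
    (∀ t ∈ ts, f t ≤ st.1) →
    ts.foldl (fun st tag => if f tag > st.1 then (f tag, some tag) else st) st = st := by
  intro ts
  induction ts with
  | nil => intro st _; rfl
  | cons t ts ih =>
    intro st h
    have ht : f t ≤ st.1 := h t (List.mem_cons_self ..)
    simp only [List.foldl_cons, if_neg (by omega : ¬ f t > st.1)]
    exact ih st (fun x hx => h x (List.mem_cons_of_mem _ hx))

lemma pvArgmax (f : String → Int) (m : Int) (tstar : String) :
    ∀ (ts : List String) (st : Int × Option String),
    st.1 < m → tstar ∈ ts → f tstar = m → (∀ t ∈ ts, f t ≤ m) →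
    (∀ t ∈ ts, f t = m → t = tstar) →
    ts.foldl (fun st tag => if f tag > st.1 then (f tag, some tag) else st) st = (m, some tstar) := by
  intro ts
  induction ts with
  | nil => intro st _ hmem; exact absurd hmem (List.not_mem_nil)
  | cons t ts ih =>
    intro st hlt hmem hf hle huniq
    by_cases hfm : f t = m
    · have : t = tstar := huniq t (List.mem_cons_self ..) hfm
      subst this
      simp only [List.foldl_cons]
      rw [if_pos (by omega : f t > st.1), hfm]
      exact pvStay f ts (m, some t) (fun x hx => hle x (List.mem_cons_of_mem _ hx))
    · have hftlt : f t < m := lt_of_le_of_ne (hle t (List.mem_cons_self ..)) hfm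
      have hmem' : tstar ∈ ts := by
        rcases List.mem_cons.mp hmem with h | h
        · exact absurd (h ▸ hf) hfm
        · exact h
      simp only [List.foldl_cons]
      split
      · exact ih (f t, some t) hftlt hmem' hf
          (fun x hx => hle x (List.mem_cons_of_mem _ hx))
          (fun x hx => huniq x (List.mem_cons_of_mem _ hx))
      · exact ih st hlt hmem' hf
          (fun x hx => hle x (List.mem_cons_of_mem _ hx))
          (fun x hx => huniq x (List.mem_cons_of_mem _ hx))

lemma pvAfold_congr (f g : String → Int) (h : ∀ t ∈ pvTags, f t = g t) :
    pvAfold f = pvAfold g := by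
  unfold pvAfold
  have : ∀ (ts : List String) (st : Int × Option String), (∀ t ∈ ts, f t = g t) →
      ts.foldl (fun st tag => if f tag > st.1 then (f tag, some tag) else st) st
      = ts.foldl (fun st tag => if g tag > st.1 then (g tag, some tag) else st) st := by
    intro ts
    induction ts with
    | nil => intro st _; rfl
    | cons t ts ih =>
      intro st hh
      simp only [List.foldl_cons, hh t (List.mem_cons_self ..)]
      exact ih _ (fun x hx => hh x (List.mem_cons_of_mem _ hx))
  exact this pvTags _ h

-- main invariant: the argmax of the downward scans equals the overall last hit
lemma pvMain (l : List Char) : ∀ k, pvAfold (fun t => pvGD l t.toList k) =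
    (match pvLastHit l k with
     | some (i, t) => ((i : Int), some t)
     | none => (-1, none)) := by
  intro k
  induction k with
  | zero =>
    simp only [pvLastHit]
    show pvAfold (fun _ => -1) = (-1, none)
    rfl
  | succ k ih =>
    rcases hhit : pvTags.find? (fun tag => tag.toList.isPrefixOf (l.drop k)) with _ | t0
    · -- no tag matches at position k: nothing changes
      have hall := List.find?_eq_none.mp hhit
      have hcong : ∀ t ∈ pvTags, pvGD l t.toList (k + 1) = pvGD l t.toList k := by
        intro t ht
        simp only [pvGD]
        rw [if_neg (by simpa using hall t ht)]
      rw [pvAfold_congr _ _ hcong, ih]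
      simp only [pvLastHit, hhit]
    · -- t0 is the unique tag matching at position k: it becomes the new argmax
      have ht0mem : t0 ∈ pvTags := List.mem_of_find?_eq_some hhit
      have ht0p : t0.toList.isPrefixOf (l.drop k) = true := by
        simpa using List.find?_some hhit
      have hGDt0 : pvGD l t0.toList (k + 1) = (k : Int) := by
        simp [pvGD, ht0p]
      have hle : ∀ t ∈ pvTags, pvGD l t.toList (k + 1) ≤ (k : Int) := by
        intro t _
        have := pvGD_le l t.toList (k + 1)
        push_cast at this ⊢; omega
      have huniq : ∀ t ∈ pvTags, pvGD l t.toList (k + 1) = (k : Int) → t = t0 := by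
        intro t ht heq
        by_cases hp : t.toList.isPrefixOf (l.drop k) = true
        · exact pvUniq l k ht ht0mem hp ht0p
        · exfalso
          have h1 : pvGD l t.toList (k + 1) = pvGD l t.toList k := by
            simp only [pvGD]
            rw [if_neg hp]
          have := pvGD_le l t.toList k
          rw [h1] at heq; omega
      unfold pvAfold
      rw [pvArgmax _ (k : Int) t0 pvTags (-1, none) (by show (-1 : Int) < (k : Int); omega) ht0mem hGDt0 hle huniq]
      simp only [pvLastHit, hhit]

-- B's forward overwrite fold equals the downward last-hit scan
lemma pvBfold (l : List Char) : ∀ (k : Nat) (r : Option String),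
    (List.range k).foldl
      (fun (result : Option String) i =>
        match pvTags.find? (fun tag => tag.toList.isPrefixOf (l.drop i)) with
        | some tag => some tag
        | none => result) r
    = (match pvLastHit l k with
       | some (_, t) => some t
       | none => r) := by
  intro k
  induction k with
  | zero => intro r; rfl
  | succ k ih =>
    intro r
    rw [List.range_succ, List.foldl_append]
    simp only [List.foldl_cons, List.foldl_nil, ih]
    rcases hhit : pvTags.find? (fun tag => tag.toList.isPrefixOf (l.drop k)) with _ | t0
    · simp only [pvLastHit, hhit]
    · simp only [pvLastHit, hhit]

-- at position l.length no (nonempty) tag matches, so scanning to n+1 = scanning to n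
lemma pvGD_top (l : List Char) (t : String) (ht : t ∈ pvTags) :
    pvGD l t.toList (l.length + 1) = pvGD l t.toList l.length := by
  have hne : t.toList ≠ [] := pvTags_ne_nil t ht
  have hp : t.toList.isPrefixOf (l.drop l.length) = false := by
    rw [List.drop_length]
    cases h : t.toList with
    | nil => exact absurd h hne
    | cons a as => simp [List.isPrefixOf]
  simp only [pvGD]
  rw [if_neg (by rw [hp]; exact Bool.false_ne_true)]

-- ===== VERDICT (by name: the statement is the Claim_ definition above) =====
theorem find_last_tag_spec : Claim_equal_find_last_tag := by
  intro text _
  show find_last_tag text = find_last_tag_alt text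
  have hA : find_last_tag text
      = (pvAfold (fun t => pvGD text.toList t.toList (text.toList.length + 1))).2 := by
    unfold find_last_tag pvAfold
    have hrf : ∀ tag : String, PySem.Str.rfind text tag
        = pvGD text.toList tag.toList (text.toList.length + 1) := by
      intro tag
      rw [PySem.Str.rfind_eq]
      unfold PySem.Chars.rfind
      exact pvGo_eq_GD text.toList tag.toList text.toList.length
    simp only [hrf]
    rfl
  have hB : find_last_tag_alt text
      = (match pvLastHit text.toList text.toList.length with
         | some (_, t) => some t
         | none => none) := by
    unfold find_last_tag_alt
    exact pvBfold text.toList text.toList.length none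
  rw [hA, hB, pvAfold_congr _ (fun t => pvGD text.toList t.toList text.toList.length)
        (fun t ht => pvGD_top text.toList t ht),
      pvMain text.toList text.toList.length]
  rcases pvLastHit text.toList text.toList.length with _ | ⟨i, t⟩ <;> rfl
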